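-- pv_equiv track=rewrite | github.com/Scientific-Computing-Lab/MonoCoder | MonoCoder/test_omp.py | concat_vars
-- ===== SOURCE A (Python) =====
-- def concat_vars(pragma):
--     unified_vars = []
--     tokens = pragma.split()
--
--     for idx, token in enumerate(tokens):
--         if token.isnumeric():
--             continue
--
--         if token in ['var', 'arr', 'struct', 'arg'] and idx < len(tokens) - 1 and tokens[idx + 1].isnumeric():
--             unified_vars.append(f'{token}_{tokens[idx + 1]}')
--         else:
--             unified_vars.append(token)
--
--     return ' '.join(unified_vars)
-- ===== SOURCE B (Python) =====
-- def concat_vars(pragma):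
--     result = []
--     prev = None
--     for token in pragma.split():
--         if token.isnumeric():
--             if prev in ('var', 'arr', 'struct', 'arg'):
--                 result[-1] = f'{prev}_{token}'
--         else:
--             result.append(token)
--         prev = token
--     return ' '.join(result)
-- ===== Notes on version B (the rewrite author's own statement) =====
-- stated objective: simpler
-- what changed: Replaced the enumerate-with-index-lookahead loop (peeking at tokens[idx+1]) by a single pass that tracks the previous token and rewrites the last element of the result when a numeric token follows a keyword.
import Mathlib
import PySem

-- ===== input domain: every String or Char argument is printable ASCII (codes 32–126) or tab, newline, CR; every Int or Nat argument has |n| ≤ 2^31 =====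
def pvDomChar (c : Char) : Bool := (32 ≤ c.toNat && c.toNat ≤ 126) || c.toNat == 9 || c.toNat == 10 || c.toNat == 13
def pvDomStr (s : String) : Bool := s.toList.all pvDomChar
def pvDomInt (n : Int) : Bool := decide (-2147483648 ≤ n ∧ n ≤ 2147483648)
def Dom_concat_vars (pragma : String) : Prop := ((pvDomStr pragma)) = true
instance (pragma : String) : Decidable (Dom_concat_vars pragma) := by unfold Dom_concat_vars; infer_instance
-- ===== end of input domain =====

-- B is a single pass tracking the previous token (no index lookahead) instead of A's
-- enumerate-with-lookahead loop; objective: simpler, same cost. Return-value equivalence only.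
-- On the ASCII domain str.isnumeric() coincides with str.isdigit(), ported as PySem.Str.strIsdigit.

-- ===== PORT A =====
-- token.isnumeric(): on the ASCII domain this is str.isdigit, i.e. PySem.Str.strIsdigit
def pvIsNum (s : String) : Bool := PySem.Str.strIsdigit s

def pvKeywords : List String := ["var", "arr", "struct", "arg"]

-- A's loop: skip numerics; a keyword followed (lookahead) by a numeric token appends 'kw_num'.
def pvGoA : List String → List String
  | [] => []
  | t :: rest =>
    if pvIsNum t then pvGoA rest
    else
      match rest with
      | n :: _ =>
        if t ∈ pvKeywords ∧ pvIsNum n then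
          (t ++ "_" ++ n) :: pvGoA rest
        else t :: pvGoA rest
      | [] => t :: pvGoA rest

def concat_vars (pragma : String) : String :=
  PySem.Str.join " " (pvGoA (PySem.Str.split₀ pragma))

-- ===== PORT B =====
-- B's loop state: (prev token, result list); a numeric token after a keyword rewrites the
-- last element of the result (result[-1] = f'{prev}_{token}').
def pvGoB : Option String → List String → List String → List String
  | _, acc, [] => acc
  | prev, acc, t :: rest =>
    if pvIsNum t then
      match prev with
      | some p =>
        if p ∈ pvKeywords then pvGoB (some t) (acc.dropLast ++ [p ++ "_" ++ t]) rest
        else pvGoB (some t) acc rest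
      | none => pvGoB (some t) acc rest
    else pvGoB (some t) (acc ++ [t]) rest

def concat_vars_alt (pragma : String) : String :=
  PySem.Str.join " " (pvGoB none [] (PySem.Str.split₀ pragma))

-- ===== PRECONDITION & SPEC =====
def Spec_concat_vars (pragma : String) (out : String) : Prop := out = concat_vars_alt pragma
instance (pragma : String) (out : String) : Decidable (Spec_concat_vars pragma out) := by unfold Spec_concat_vars; infer_instance

-- ===== CLAIM (what is proved, stated in full; the proofs are below) =====
def Claim_equal_concat_vars : Prop := ∀ (pragma : String), Dom_concat_vars pragma → Spec_concat_vars pragma (concat_vars pragma)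

-- ===== LEMMAS AND PROOFS =====

-- a numeric (all-digits, nonempty) token is never one of the keywords
theorem pv_digit_not_kw {t : String} (h : pvIsNum t = true) : t ∉ pvKeywords := by
  intro hmem
  fin_cases hmem <;> exact absurd h (by decide)

-- the head of ts is numeric
def pvNumHead (ts : List String) : Prop :=
  match ts with
  | [] => False
  | n :: _ => pvIsNum n = true

-- main invariant: as long as prev is not a "live" keyword (a keyword immediately
-- followed by a numeric head), B's fold just appends A's output to acc.
theorem pvGoB_eq (N : Nat) : ∀ ts : List String, ts.length ≤ N → ∀ acc : List String,
    ∀ prev : Option String,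
    (∀ p, prev = some p → p ∈ pvKeywords → ¬ pvNumHead ts) →
    pvGoB prev acc ts = acc ++ pvGoA ts := by
  induction N with
  | zero =>
    intro ts hlen acc prev _
    match ts with
    | [] => simp [pvGoB, pvGoA]
    | _ :: _ => simp at hlen
  | succ n ih =>
    intro ts hlen acc prev hprev
    match ts with
    | [] => simp [pvGoB, pvGoA]
    | t :: rest =>
      by_cases hd : pvIsNum t = true
      · -- numeric token: A skips it; B's prev (by hprev) cannot be a keyword
        have hnotkw : ∀ p, prev = some p → p ∉ pvKeywords := by
          intro p hp hk
          exact hprev p hp hk (by simpa [pvNumHead] using hd)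
        have hstep : pvGoB prev acc (t :: rest) = pvGoB (some t) acc rest := by
          match prev with
          | none => simp [pvGoB, hd]
          | some p => simp [pvGoB, hd, hnotkw p rfl]
        rw [hstep, ih rest (by simpa using Nat.le_of_succ_le_succ hlen) acc (some t)
          (by intro p hp hk; cases hp; exact absurd hk (pv_digit_not_kw hd))]
        simp [pvGoA, hd]
      · -- non-numeric token: B appends t and t becomes prev
        have hstep : pvGoB prev acc (t :: rest) = pvGoB (some t) (acc ++ [t]) rest := by
          simp [pvGoB, hd]
        rw [hstep]
        by_cases hlive : t ∈ pvKeywords ∧ pvNumHead rest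
        · -- keyword followed by numeric: B rewrites the last element, A emits t_n
          obtain ⟨hk, hn⟩ := hlive
          match rest with
          | [] => exact absurd hn (by simp [pvNumHead])
          | m :: rest' =>
            have hm : pvIsNum m = true := hn
            have hstep2 : pvGoB (some t) (acc ++ [t]) (m :: rest') =
                pvGoB (some m) (acc ++ [t ++ "_" ++ m]) rest' := by
              simp [pvGoB, hm, hk]
            rw [hstep2, ih rest' (by simp at hlen; omega) _ (some m)
              (by intro p hp hkp; cases hp; exact absurd hkp (pv_digit_not_kw hm))]
            simp [pvGoA, hd, hk, hm]
        · -- otherwise A emits t plainly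
          rw [ih rest (by simpa using Nat.le_of_succ_le_succ hlen) (acc ++ [t]) (some t)
            (by intro p hp hkp hnh; cases hp; exact hlive ⟨hkp, hnh⟩)]
          match rest with
          | [] => simp [pvGoA, hd]
          | m :: rest' =>
            have : ¬ (t ∈ pvKeywords ∧ pvIsNum m = true) := by
              intro ⟨h1, h2⟩; exact hlive ⟨h1, h2⟩
            simp [pvGoA, hd, this]

-- ===== VERDICT (by name: the statement is the Claim_ definition above) =====
theorem concat_vars_spec : Claim_equal_concat_vars := by
  intro pragma _
  unfold Spec_concat_vars concat_vars concat_vars_alt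
  rw [pvGoB_eq (PySem.Str.split₀ pragma).length (PySem.Str.split₀ pragma) le_rfl [] none
    (by intro p hp; cases hp)]
  simp
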